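-- pv_equiv track=rewrite | github.com/uttamapaksa/algorithm | 프로그래머스/2/86971. 전력망을 둘로 나누기/전력망을 둘로 나누기.py | solution
-- ===== SOURCE A (Python) =====
-- def solution(n, wires):
--
--     def count(u):
--         if child[u]:
--             return 0
--         child[u] = 1
--         for v in tree[u]:
--             child[u] += count(v)
--         return child[u]
--
--
--     child = [0] * (n+1)
--     tree = [[] for _ in range(n+1)]
--     for u, v in wires:
--         tree[u].append(v)
--         tree[v].append(u)
--     count(1)
--
--     answer = min(abs(n - 2*c) for c in child)
--     return answer
-- ===== SOURCE B (Python) =====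
-- def solution(n, wires):
--     # iterative explicit-stack post-order DFS instead of A's recursive count()
--     adj = [[] for _ in range(n + 1)]
--     for u, v in wires:
--         adj[u].append(v)
--         adj[v].append(u)
--     size = [0] * (n + 1)
--     size[1] = 1
--     stack = [(1, 0)]
--     while stack:
--         u, i = stack.pop()
--         nbrs = adj[u]
--         if i < len(nbrs):
--             stack.append((u, i + 1))
--             v = nbrs[i]
--             if size[v] == 0:
--                 size[v] = 1
--                 stack.append((v, 0))
--         elif stack:
--             size[stack[-1][0]] += size[u]
--     return min(abs(n - 2 * s) for s in size)
-- ===== Notes on version B (the rewrite author's own statement) =====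
-- stated objective: alternative
-- what changed: A's recursive count() is replaced by an explicit-stack iterative post-order DFS that keeps (node, next-neighbor-index) frames and folds each finished node's subtree size into its parent's frame; the adjacency build and the final min are unchanged.
import Mathlib
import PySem

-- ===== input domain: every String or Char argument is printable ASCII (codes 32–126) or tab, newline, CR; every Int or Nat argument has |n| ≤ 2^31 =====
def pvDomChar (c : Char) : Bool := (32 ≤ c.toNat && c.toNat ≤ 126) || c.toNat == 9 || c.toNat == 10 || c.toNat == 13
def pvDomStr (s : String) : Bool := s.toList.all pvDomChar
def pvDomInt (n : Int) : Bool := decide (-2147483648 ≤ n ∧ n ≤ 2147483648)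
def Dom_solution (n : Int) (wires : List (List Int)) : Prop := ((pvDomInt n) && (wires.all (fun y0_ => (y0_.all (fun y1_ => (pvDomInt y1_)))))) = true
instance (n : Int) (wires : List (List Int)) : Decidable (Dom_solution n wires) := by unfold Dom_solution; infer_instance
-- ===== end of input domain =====

-- B replaces A's recursive count() by an explicit-stack iterative post-order DFS that
-- accumulates each finished node's subtree size into its parent's frame
-- (objective: alternative decomposition; both build the same adjacency lists).

-- Python list indexing xs[u] for -len ≤ u < len (negative u wraps); exact on that range,
-- which is all Pre_ admits
def pidx (len : Nat) (u : Int) : Nat := (if u < 0 then u + (len : Int) else u).toNat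

-- tree[u].append(v); tree[v].append(u)  — this loop body is textually the same in A and B
def addEdge (tree : List (List Int)) (w : List Int) : List (List Int) :=
  match w with
  | [u, v] =>
    let t1 := tree.set (pidx tree.length u) ((tree.getD (pidx tree.length u) []) ++ [v])
    t1.set (pidx t1.length v) ((t1.getD (pidx t1.length v) []) ++ [u])
  | _ => tree

-- min(abs(n - 2*c) for c in child)  — the same final expression in A and B
def minAbsA (n : Int) (l : List Int) : Int :=
  match l.map (fun c => |n - 2*c|) with
  | [] => 0            -- unreachable under Pre_ (Python's min raises on an empty sequence)
  | x :: xs => xs.foldl min x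

-- ===== PORT A =====
-- the recursive count(u), with the child array passed as state; fuel bounds the recursion
-- depth (depth never exceeds the number of zero entries of child, so the fuel given in
-- `solution` is never exhausted)
def countA (tree : List (List Int)) : Nat → List Int → Int → Int × List Int
  | 0, child, _ => (0, child)
  | fuel+1, child, u =>
    if child.getD (pidx child.length u) 0 ≠ 0 then (0, child)
    else
      let child2 := (tree.getD (pidx tree.length u) []).foldl
        (fun ch v =>
          let t := countA tree fuel ch v
          t.2.set (pidx t.2.length u) (t.2.getD (pidx t.2.length u) 0 + t.1)) (child.set (pidx child.length u) 1)
      (child2.getD (pidx child2.length u) 0, child2)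

def solution (n : Int) (wires : List (List Int)) : Int :=
  let tree := wires.foldl addEdge (List.replicate (n+1).toNat [])
  let child0 := List.replicate (n+1).toNat (0 : Int)
  let child := (countA tree (child0.length + 1) child0 1).2
  minAbsA n child

-- ===== PORT B =====
-- the while loop over the explicit stack of (node, next-neighbor-index) frames; fuel
-- bounds the number of iterations (the fuel given in `solution_alt` is never exhausted)
def runB (adj : List (List Int)) : Nat → List (Int × Nat) → List Int → List Int
  | 0, _, size => size
  | _+1, [], size => size
  | fuel+1, (u, i) :: rest, size =>
    let nbrs := adj.getD (pidx adj.length u) []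
    if h : i < nbrs.length then
      let v := nbrs[i]
      if size.getD (pidx size.length v) 0 = 0 then
        runB adj fuel ((v, 0) :: (u, i+1) :: rest) (size.set (pidx size.length v) 1)
      else
        runB adj fuel ((u, i+1) :: rest) size
    else
      match rest with
      | [] => runB adj fuel [] size
      | (p, _) :: _ =>
        runB adj fuel rest
          (size.set (pidx size.length p) (size.getD (pidx size.length p) 0 + size.getD (pidx size.length u) 0))

def solution_alt (n : Int) (wires : List (List Int)) : Int :=
  let adj := wires.foldl addEdge (List.replicate (n+1).toNat [])
  let size0 := (List.replicate (n+1).toNat (0 : Int)).set 1 1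
  let size := runB adj (((n+1).toNat + 1) * (2 * wires.length + 2)) [(1, 0)] size0
  minAbsA n size

-- ===== PRECONDITION & SPEC =====
-- Pre_ is exactly the natural domain on which A returns: n ≥ 1 and wires a list of pairs
-- of in-range node labels (Python accepts -(n+1) ≤ x ≤ n; outside, A raises IndexError,
-- a tuple-unpacking error, or min() of an empty sequence).
def Pre_solution (n : Int) (wires : List (List Int)) : Prop :=
  1 ≤ n ∧ (wires.all (fun w => w.length == 2 && w.all (fun x => decide (-(n+1) ≤ x) && decide (x ≤ n)))) = true
instance (n : Int) (wires : List (List Int)) : Decidable (Pre_solution n wires) := by unfold Pre_solution; infer_instance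

def pvWitness_solution : Int × List (List Int) := (4, [[1, 4], [4, 2], [4, 3]])

def Spec_solution (n : Int) (wires : List (List Int)) (out : Int) : Prop := out = solution_alt n wires
instance (n : Int) (wires : List (List Int)) (out : Int) : Decidable (Spec_solution n wires out) := by unfold Spec_solution; infer_instance

-- ===== CLAIM (what is proved, stated in full; the proofs are below) =====
def Claim_equal_solution : Prop := ∀ (n : Int) (wires : List (List Int)), Dom_solution n wires → Pre_solution n wires → Spec_solution n wires (solution n wires)

-- ===== LEMMAS AND PROOFS =====

-- the body of A's inner for-loop, named (countA (fuel+1) unfolds to a foldl of it)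
def stepA (tree : List (List Int)) (fuel : Nat) (u : Int) (ch : List Int) (v : Int) : List Int :=
  let t := countA tree fuel ch v
  t.2.set (pidx t.2.length u) (t.2.getD (pidx t.2.length u) 0 + t.1)

lemma countA_succ (tree : List (List Int)) (fuel : Nat) (child : List Int) (u : Int) :
    countA tree (fuel+1) child u =
      if child.getD (pidx child.length u) 0 ≠ 0 then (0, child)
      else
        let c2 := (tree.getD (pidx tree.length u) []).foldl (stepA tree fuel u)
          (child.set (pidx child.length u) 1)
        (c2.getD (pidx c2.length u) 0, c2) := rfl

-- pointwise facts about List Int viewed as an integer array with default 0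
def znn (l : List Int) : Prop := ∀ k : Nat, 0 ≤ l.getD k 0
def lep (l₁ l₂ : List Int) : Prop := l₁.length = l₂.length ∧ ∀ k : Nat, l₁.getD k 0 ≤ l₂.getD k 0
def zct (l : List Int) : Nat := l.countP (fun x => decide (x = 0))

lemma getD_set_self {l : List Int} {k : Nat} {x : Int} (h : k < l.length) :
    (l.set k x).getD k 0 = x := by
  simp [List.getD_eq_getElem?_getD, h]

lemma getD_set_ne {l : List Int} {k m : Nat} {x : Int} (h : m ≠ k) :
    (l.set k x).getD m 0 = l.getD m 0 := by
  simp [List.getD_eq_getElem?_getD, (Ne.symm h : k ≠ m)]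

lemma set_getD_self {l : List Int} {k : Nat} : l.set k (l.getD k 0) = l := by
  by_cases h : k < l.length
  · apply List.ext_getElem?
    intro m
    by_cases hm : k = m
    · subst hm; simp [List.getElem?_set, h, List.getD_eq_getElem?_getD]
    · simp [List.getElem?_set, hm]
  · exact List.set_eq_of_length_le (le_of_not_gt h)

lemma lep_refl (l : List Int) : lep l l := ⟨rfl, fun _ => le_refl _⟩

lemma lep_trans {l₁ l₂ l₃ : List Int} (h₁ : lep l₁ l₂) (h₂ : lep l₂ l₃) : lep l₁ l₃ :=
  ⟨h₁.1.trans h₂.1, fun k => (h₁.2 k).trans (h₂.2 k)⟩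

lemma lep_set_ge {l : List Int} {k : Nat} {x : Int} (h : l.getD k 0 ≤ x) : lep l (l.set k x) := by
  by_cases hk : k < l.length
  · refine ⟨(List.length_set).symm, fun m => ?_⟩
    by_cases hm : m = k
    · subst hm; rw [getD_set_self hk]; exact h
    · rw [getD_set_ne hm]
  · rw [List.set_eq_of_length_le (le_of_not_gt hk)]; exact lep_refl l

lemma znn_of_lep {l₁ l₂ : List Int} (h : znn l₁) (hle : lep l₁ l₂) : znn l₂ :=
  fun k => le_trans (h k) (hle.2 k)

lemma zct_le_length (l : List Int) : zct l ≤ l.length := List.countP_le_length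

lemma getD_cons_succ {a : Int} {l : List Int} {k : Nat} : (a :: l).getD (k+1) 0 = l.getD k 0 := rfl

lemma zct_le_of_lep : ∀ {l₁ l₂ : List Int}, lep l₁ l₂ → znn l₁ → zct l₂ ≤ zct l₁ := by
  intro l₁
  induction l₁ with
  | nil => intro l₂ h _; have : l₂ = [] := List.eq_nil_of_length_eq_zero h.1.symm; simp [this]
  | cons a t ih =>
    intro l₂ h hn
    match l₂, h.1 with
    | b :: t₂, _ =>
      have hab : a ≤ b := by have := h.2 0; simpa [List.getD] using this
      have ha : 0 ≤ a := by have := hn 0; simpa [List.getD] using this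
      have htail : lep t t₂ := by
        refine ⟨by simpa using h.1, fun k => ?_⟩
        have := h.2 (k+1); simpa [getD_cons_succ] using this
      have hnt : znn t := fun k => by have := hn (k+1); simpa [getD_cons_succ] using this
      have hzt := ih htail hnt
      simp only [zct, List.countP_cons] at hzt ⊢
      by_cases hb : b = 0
      · have ha0 : a = 0 := le_antisymm (hb ▸ hab) ha
        simp [hb, ha0]; omega
      · by_cases ha0 : a = 0 <;> simp [hb, ha0] <;> omega

lemma zct_set1 {l : List Int} : ∀ {k : Nat}, k < l.length → l.getD k 0 = 0 →
    zct (l.set k 1) + 1 = zct l := by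
  induction l with
  | nil => intro k h; simp at h
  | cons a t ih =>
    intro k hk h0
    cases k with
    | zero =>
      have : a = 0 := by simpa [List.getD] using h0
      subst this; simp [zct, List.countP_cons]
    | succ k =>
      have hk' : k < t.length := by simpa using hk
      have h0' : t.getD k 0 = 0 := by simpa [getD_cons_succ] using h0
      have := ih hk' h0'
      simp only [List.set, zct, List.countP_cons] at *
      omega

-- length preservation
lemma countA_len (tree : List (List Int)) :
    ∀ (f : Nat) (ch : List Int) (u : Int), ((countA tree f ch u).2).length = ch.length := by
  intro f
  induction f with
  | zero => intro ch u; rfl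
  | succ f ih =>
    intro ch u
    rw [countA_succ]
    by_cases h : ch.getD (pidx ch.length u) 0 ≠ 0
    · rw [if_pos h]
    · rw [if_neg h]
      have aux : ∀ (l : List Int) (c : List Int),
          ((l.foldl (stepA tree f u) c)).length = c.length := by
        intro l
        induction l with
        | nil => intro c; rfl
        | cons v l ihl =>
          intro c
          rw [List.foldl_cons, ihl]
          simp [stepA, ih]
      show ((tree.getD (pidx tree.length u) []).foldl (stepA tree f u)
        (ch.set (pidx ch.length u) 1)).length = ch.length
      rw [aux, List.length_set]

lemma stepA_len (tree : List (List Int)) (f : Nat) (u : Int) (ch : List Int) (v : Int) :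
    (stepA tree f u ch v).length = ch.length := by
  simp [stepA, countA_len]

lemma foldl_stepA_len (tree : List (List Int)) (f : Nat) (u : Int) :
    ∀ (l : List Int) (ch : List Int), (l.foldl (stepA tree f u) ch).length = ch.length := by
  intro l
  induction l with
  | nil => intro ch; rfl
  | cons v l ih => intro ch; rw [List.foldl_cons, ih, stepA_len]

-- monotonicity: count never decreases an entry and returns a nonnegative value
lemma countA_mono (tree : List (List Int)) :
    ∀ (f : Nat) (ch : List Int) (u : Int), znn ch →
      lep ch (countA tree f ch u).2 ∧ 0 ≤ (countA tree f ch u).1 := by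
  intro f
  induction f with
  | zero => intro ch u _; exact ⟨lep_refl ch, le_refl 0⟩
  | succ f ih =>
    intro ch u hnn
    rw [countA_succ]
    by_cases h : ch.getD (pidx ch.length u) 0 ≠ 0
    · rw [if_pos h]; exact ⟨lep_refl ch, le_refl 0⟩
    · rw [if_neg h]
      push_neg at h
      have hset : lep ch (ch.set (pidx ch.length u) 1) := lep_set_ge (by rw [h]; norm_num)
      have hsetnn : znn (ch.set (pidx ch.length u) 1) := znn_of_lep hnn hset
      have aux : ∀ (l : List Int) (c : List Int), znn c →
          lep c (l.foldl (stepA tree f u) c) ∧ znn (l.foldl (stepA tree f u) c) := by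
        intro l
        induction l with
        | nil => intro c hc; exact ⟨lep_refl c, hc⟩
        | cons v l ihl =>
          intro c hc
          rw [List.foldl_cons]
          have hm := ih c v hc
          have hstep : lep c (stepA tree f u c v) := by
            refine lep_trans hm.1 (lep_set_ge ?_)
            have : (0:Int) ≤ (countA tree f c v).1 := hm.2
            omega
          have hstepnn : znn (stepA tree f u c v) := znn_of_lep hc hstep
          have := ihl (stepA tree f u c v) hstepnn
          exact ⟨lep_trans hstep this.1, this.2⟩
      have haux := aux (tree.getD (pidx tree.length u) []) (ch.set (pidx ch.length u) 1) hsetnn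
      exact ⟨lep_trans hset haux.1, haux.2 _⟩

lemma stepA_lep (tree : List (List Int)) (f : Nat) (u : Int) {ch : List Int} (v : Int)
    (hnn : znn ch) : lep ch (stepA tree f u ch v) := by
  have hm := countA_mono tree f ch v hnn
  refine lep_trans hm.1 (lep_set_ge ?_)
  have : (0:Int) ≤ (countA tree f ch v).1 := hm.2
  omega

-- a wrapped index is out of range only when the whole array would be (u ≥ len)
lemma pidx_ge {len : Nat} {u : Int} (h : ¬ pidx len u < len) : (len : Int) ≤ u ∨ len = 0 := by
  simp only [pidx] at h
  split_ifs at h <;> omega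

-- fuel irrelevance: any two sufficient fuels give the same computation
lemma countA_fuel (tree : List (List Int)) :
    ∀ (f₁ f₂ : Nat) (ch : List Int) (u : Int), znn ch → tree.length = ch.length →
      zct ch < f₁ → zct ch < f₂ → countA tree f₁ ch u = countA tree f₂ ch u := by
  intro f₁
  induction f₁ with
  | zero => intro f₂ ch u _ _ h1 _; omega
  | succ a ih =>
    intro f₂ ch u hnn hlen h1 h2
    match f₂, h2 with
    | b+1, _ =>
      rw [countA_succ, countA_succ]
      by_cases h : ch.getD (pidx ch.length u) 0 ≠ 0
      · rw [if_pos h, if_pos h]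
      · rw [if_neg h, if_neg h]
        push_neg at h
        by_cases hu : pidx ch.length u < ch.length
        · have hz : zct (ch.set (pidx ch.length u) 1) + 1 = zct ch := zct_set1 hu h
          have hset : lep ch (ch.set (pidx ch.length u) 1) := lep_set_ge (by rw [h]; norm_num)
          have hsetnn : znn (ch.set (pidx ch.length u) 1) := znn_of_lep hnn hset
          have aux : ∀ (l : List Int) (c : List Int), znn c → tree.length = c.length →
              zct c < a → zct c < b →
              l.foldl (stepA tree a u) c = l.foldl (stepA tree b u) c := by
            intro l
            induction l with
            | nil => intro c _ _ _ _; rfl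
            | cons v l ihl =>
              intro c hc hcl hca hcb
              have hcnt : countA tree a c v = countA tree b c v := ih b c v hc hcl hca hcb
              rw [List.foldl_cons, List.foldl_cons]
              have hsv : stepA tree a u c v = stepA tree b u c v := by
                simp [stepA, hcnt]
              rw [hsv]
              have hlep : lep c (stepA tree b u c v) := stepA_lep tree b u v hc
              exact ihl (stepA tree b u c v) (znn_of_lep hc hlep)
                (by rw [← hlep.1]; exact hcl)
                (lt_of_le_of_lt (zct_le_of_lep hlep hc) hca)
                (lt_of_le_of_lt (zct_le_of_lep hlep hc) hcb)
          have hfold := aux (tree.getD (pidx tree.length u) []) (ch.set (pidx ch.length u) 1) hsetnn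
            (by rw [List.length_set]; exact hlen) (by omega) (by omega)
          show (let c2 := (tree.getD (pidx tree.length u) []).foldl (stepA tree a u)
                  (ch.set (pidx ch.length u) 1)
                (c2.getD (pidx c2.length u) 0, c2)) =
               (let c2 := (tree.getD (pidx tree.length u) []).foldl (stepA tree b u)
                  (ch.set (pidx ch.length u) 1)
                (c2.getD (pidx c2.length u) 0, c2))
          rw [hfold]
        · -- wrapped index out of range: the neighbor list is out of range too, loop is empty
          have htree : tree.getD (pidx tree.length u) [] = [] := by
            rcases pidx_ge hu with hcase | hcase
            · rw [List.getD_eq_getElem?_getD, List.getElem?_eq_none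
                (by simp only [pidx]; split_ifs <;> omega)]
              rfl
            · rw [List.getD_eq_getElem?_getD, List.getElem?_eq_none (by omega)]
              rfl
          show (let c2 := (tree.getD (pidx tree.length u) []).foldl (stepA tree a u)
                  (ch.set (pidx ch.length u) 1)
                (c2.getD (pidx c2.length u) 0, c2)) =
               (let c2 := (tree.getD (pidx tree.length u) []).foldl (stepA tree b u)
                  (ch.set (pidx ch.length u) 1)
                (c2.getD (pidx c2.length u) 0, c2))
          rw [htree]
          simp

lemma foldl_stepA_fuel (tree : List (List Int)) (f₁ f₂ : Nat) (u : Int) :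
    ∀ (l : List Int) (ch : List Int), znn ch → tree.length = ch.length →
      zct ch < f₁ → zct ch < f₂ →
      l.foldl (stepA tree f₁ u) ch = l.foldl (stepA tree f₂ u) ch := by
  intro l
  induction l with
  | nil => intro ch _ _ _ _; rfl
  | cons v l ih =>
    intro ch hnn hlen h1 h2
    have hcnt : countA tree f₁ ch v = countA tree f₂ ch v := countA_fuel tree f₁ f₂ ch v hnn hlen h1 h2
    rw [List.foldl_cons, List.foldl_cons]
    have hsv : stepA tree f₁ u ch v = stepA tree f₂ u ch v := by simp [stepA, hcnt]
    rw [hsv]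
    have hlep : lep ch (stepA tree f₂ u ch v) := stepA_lep tree f₂ u v hnn
    exact ih (stepA tree f₂ u ch v) (znn_of_lep hnn hlep)
      (by rw [← hlep.1]; exact hlen)
      (lt_of_le_of_lt (zct_le_of_lep hlep hnn) h1)
      (lt_of_le_of_lt (zct_le_of_lep hlep hnn) h2)

-- A-side meaning of the stack machine: finish the top frame, fold its size into the
-- parent frame, continue
def processStack (tree : List (List Int)) : List (Int × Nat) → List Int → List Int
  | [], child => child
  | (u, i) :: rest, child =>
    let child' := ((tree.getD (pidx tree.length u) []).drop i).foldl
      (stepA tree (child.length + 1) u) child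
    match rest with
    | [] => child'
    | (p, _) :: _ =>
      processStack tree rest
        (child'.set (pidx child'.length p)
          (child'.getD (pidx child'.length p) 0 + child'.getD (pidx child'.length u) 0))

def WFs (tree : List (List Int)) (stack : List (Int × Nat)) (size : List Int) : Prop :=
  tree.length = size.length ∧ znn size ∧
  (∀ l ∈ tree, ∀ v ∈ l, pidx size.length v < size.length) ∧
  (∀ q ∈ stack, size.getD (pidx size.length q.1) 0 ≠ 0)

def muS (tree : List (List Int)) (D : Nat) (stack : List (Int × Nat)) (size : List Int) : Nat :=
  (stack.map (fun q => (tree.getD (pidx tree.length q.1) []).length - q.2)).sum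
    + stack.length + zct size * (D + 2)

lemma runB_nil (adj : List (List Int)) (f : Nat) (size : List Int) :
    runB adj f [] size = size := by cases f <;> rfl

lemma runB_cons (adj : List (List Int)) (f : Nat) (u : Int) (i : Nat)
    (rest : List (Int × Nat)) (size : List Int) :
    runB adj (f+1) ((u, i) :: rest) size =
      (let nbrs := adj.getD (pidx adj.length u) []
       if h : i < nbrs.length then
         let v := nbrs[i]
         if size.getD (pidx size.length v) 0 = 0 then
           runB adj f ((v, 0) :: (u, i+1) :: rest) (size.set (pidx size.length v) 1)
         else
           runB adj f ((u, i+1) :: rest) size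
       else
         match rest with
         | [] => runB adj f [] size
         | (p, _) :: _ =>
           runB adj f rest
             (size.set (pidx size.length p)
               (size.getD (pidx size.length p) 0 + size.getD (pidx size.length u) 0))) := rfl

lemma processStack_cons (tree : List (List Int)) (u : Int) (i : Nat)
    (rest : List (Int × Nat)) (child : List Int) :
    processStack tree ((u, i) :: rest) child =
      (let child' := ((tree.getD (pidx tree.length u) []).drop i).foldl
        (stepA tree (child.length + 1) u) child
       match rest with
       | [] => child'
       | (p, _) :: _ =>
         processStack tree rest
           (child'.set (pidx child'.length p)
             (child'.getD (pidx child'.length p) 0 + child'.getD (pidx child'.length u) 0))) := rfl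

lemma getD_tree_le {tree : List (List Int)} {D : Nat} (Hdeg : ∀ l ∈ tree, l.length ≤ D)
    (k : Nat) : (tree.getD k []).length ≤ D := by
  by_cases hk : k < tree.length
  · exact Hdeg _ (by rw [List.getD_eq_getElem?_getD, List.getElem?_eq_getElem hk]; exact List.getElem_mem hk)
  · rw [List.getD_eq_getElem?_getD, List.getElem?_eq_none (by omega)]; simp

lemma getD_tree_mem {tree : List (List Int)} {k : Nat} (h : (tree.getD k []) ≠ []) :
    tree.getD k [] ∈ tree := by
  by_cases hk : k < tree.length
  · rw [List.getD_eq_getElem?_getD, List.getElem?_eq_getElem hk]; exact List.getElem_mem hk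
  · exfalso; apply h; rw [List.getD_eq_getElem?_getD, List.getElem?_eq_none (by omega)]; rfl

-- advancing past an already-visited neighbor leaves the A-side result unchanged
lemma ps_adv (tree : List (List Int)) (u : Int) (i : Nat) (rest : List (Int × Nat))
    (size : List Int) (hi : i < (tree.getD (pidx tree.length u) []).length)
    (hz : size.getD (pidx size.length ((tree.getD (pidx tree.length u) [])[i])) 0 ≠ 0) :
    processStack tree ((u, i) :: rest) size = processStack tree ((u, i+1) :: rest) size := by
  rw [processStack_cons, processStack_cons]
  have hdrop : (tree.getD (pidx tree.length u) []).drop i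
      = (tree.getD (pidx tree.length u) [])[i] :: (tree.getD (pidx tree.length u) []).drop (i+1) :=
    (List.getElem_cons_drop hi).symm
  rw [hdrop, List.foldl_cons]
  have hstep : stepA tree (size.length + 1) u size ((tree.getD (pidx tree.length u) [])[i]) = size := by
    show (let t := countA tree (size.length + 1) size ((tree.getD (pidx tree.length u) [])[i])
          t.2.set (pidx t.2.length u) (t.2.getD (pidx t.2.length u) 0 + t.1)) = size
    rw [countA_succ, if_pos hz]
    show size.set (pidx size.length u) (size.getD (pidx size.length u) 0 + 0) = size
    rw [add_zero]; exact set_getD_self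
  rw [hstep]

-- pushing a fresh neighbor's frame corresponds to entering the recursive call
lemma ps_push (tree : List (List Int)) (u : Int) (i : Nat) (rest : List (Int × Nat))
    (size : List Int) (hlen : tree.length = size.length) (hnn : znn size)
    (hi : i < (tree.getD (pidx tree.length u) []).length)
    (hvr : pidx size.length ((tree.getD (pidx tree.length u) [])[i]) < size.length)
    (hz : size.getD (pidx size.length ((tree.getD (pidx tree.length u) [])[i])) 0 = 0) :
    processStack tree ((u, i) :: rest) size =
      processStack tree (((tree.getD (pidx tree.length u) [])[i], 0) :: (u, i+1) :: rest)
        (size.set (pidx size.length ((tree.getD (pidx tree.length u) [])[i])) 1) := by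
  set v : Int := (tree.getD (pidx tree.length u) [])[i] with hv
  set size' : List Int := size.set (pidx size.length v) 1 with hsz
  have hlen' : size'.length = size.length := List.length_set
  have hnn' : znn size' := znn_of_lep hnn (lep_set_ge (by rw [hz]; norm_num))
  have hzct : zct size' + 1 = zct size := zct_set1 hvr hz
  have hzlt : zct size' < size.length :=
    lt_of_lt_of_le (by omega) (zct_le_length size)
  -- the machine's subtree loop at fuel L+1 equals the recursion's inner loop at fuel L
  have hfold : (tree.getD (pidx tree.length v) []).foldl (stepA tree (size.length + 1) v) size'
      = (tree.getD (pidx tree.length v) []).foldl (stepA tree size.length v) size' :=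
    foldl_stepA_fuel tree (size.length + 1) size.length v _ size' hnn'
      (by rw [hlen']; exact hlen) (by omega) hzlt
  set c2 : List Int := (tree.getD (pidx tree.length v) []).foldl (stepA tree size.length v) size' with hc2
  have hc2len : c2.length = size.length := by
    rw [hc2, foldl_stepA_len, hlen']
  -- LHS: unfold one iteration of the loop of frame u
  rw [processStack_cons]
  have hdrop : (tree.getD (pidx tree.length u) []).drop i
      = v :: (tree.getD (pidx tree.length u) []).drop (i+1) :=
    (List.getElem_cons_drop hi).symm
  rw [hdrop, List.foldl_cons]
  have hstep : stepA tree (size.length + 1) u size v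
      = c2.set (pidx c2.length u) (c2.getD (pidx c2.length u) 0 + c2.getD (pidx c2.length v) 0) := by
    show (let t := countA tree (size.length + 1) size v
          t.2.set (pidx t.2.length u) (t.2.getD (pidx t.2.length u) 0 + t.1)) = _
    rw [countA_succ, if_neg (by simpa [hlen] using hz)]
  rw [hstep]
  -- RHS: unfold the pushed frame (v, 0) and the parent update
  rw [processStack_cons]
  simp only [List.drop_zero]
  rw [hlen', hfold]
  rw [processStack_cons]
  simp only [List.length_set, hc2len]

-- finishing a frame folds its accumulated size into the parent frame
lemma ps_pop (tree : List (List Int)) (u p : Int) (i j : Nat) (rest : List (Int × Nat))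
    (size : List Int) (hi : ¬ i < (tree.getD (pidx tree.length u) []).length) :
    processStack tree ((u, i) :: (p, j) :: rest) size =
      processStack tree ((p, j) :: rest)
        (size.set (pidx size.length p)
          (size.getD (pidx size.length p) 0 + size.getD (pidx size.length u) 0)) := by
  rw [processStack_cons]
  rw [List.drop_eq_nil_of_le (le_of_not_gt hi)]
  simp

lemma ps_last (tree : List (List Int)) (u : Int) (i : Nat)
    (size : List Int) (hi : ¬ i < (tree.getD (pidx tree.length u) []).length) :
    processStack tree [(u, i)] size = size := by
  rw [processStack_cons]
  rw [List.drop_eq_nil_of_le (le_of_not_gt hi)]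
  simp

lemma sim (tree : List (List Int)) (D : Nat)
    (Hdeg : ∀ l ∈ tree, l.length ≤ D) :
    ∀ (fuel : Nat) (stack : List (Int × Nat)) (size : List Int),
      WFs tree stack size → muS tree D stack size ≤ fuel →
      runB tree fuel stack size = processStack tree stack size := by
  intro fuel
  induction fuel with
  | zero =>
    intro stack size hwf hmu
    match stack with
    | [] => rfl
    | q :: rest => exfalso; simp [muS] at hmu
  | succ fuel ih =>
    intro stack size hwf hmu
    match stack with
    | [] => rfl
    | (u, i) :: rest =>
      obtain ⟨hlen, hnn, htree, hstack⟩ := hwf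
      have hq := hstack (u, i) List.mem_cons_self
      rw [runB_cons]
      by_cases hi : i < (tree.getD (pidx tree.length u) []).length
      · rw [dif_pos hi]
        set v : Int := (tree.getD (pidx tree.length u) [])[i] with hv
        have hmemnb : tree.getD (pidx tree.length u) [] ∈ tree :=
          getD_tree_mem (by intro h; rw [h] at hi; simp at hi)
        have hvr : pidx size.length v < size.length := htree _ hmemnb v (hv ▸ List.getElem_mem hi)
        by_cases hz : size.getD (pidx size.length v) 0 = 0
        · rw [if_pos hz]
          have hzct : zct (size.set (pidx size.length v) 1) + 1 = zct size := zct_set1 hvr hz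
          have hwf' : WFs tree ((v, 0) :: (u, i+1) :: rest) (size.set (pidx size.length v) 1) := by
            refine ⟨by rw [List.length_set]; exact hlen,
              znn_of_lep hnn (lep_set_ge (by rw [hz]; norm_num)),
              by intro l hl w hw; rw [List.length_set]; exact htree l hl w hw, ?_⟩
            intro q hqmem
            rcases List.mem_cons.mp hqmem with rfl | hqmem'
            · rw [List.length_set, getD_set_self hvr]; norm_num
            · have hqold : size.getD (pidx size.length q.1) 0 ≠ 0 := by
                rcases List.mem_cons.mp hqmem' with rfl | h
                · exact hq
                · exact hstack q (List.mem_cons_of_mem _ h)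
              rw [List.length_set]
              by_cases he : pidx size.length q.1 = pidx size.length v
              · rw [he, getD_set_self hvr]; norm_num
              · rw [getD_set_ne he]; exact hqold
          have hmu' : muS tree D ((v, 0) :: (u, i+1) :: rest) (size.set (pidx size.length v) 1)
              ≤ fuel := by
            have hdv : (tree.getD (pidx tree.length v) []).length ≤ D := getD_tree_le Hdeg _
            have hmul : zct size * (D + 2)
                = zct (size.set (pidx size.length v) 1) * (D + 2) + (D + 2) := by
              rw [← hzct]; ring
            simp only [muS, List.map_cons, List.sum_cons, List.length_cons] at hmu ⊢
            omega
          rw [ih _ _ hwf' hmu']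
          rw [← ps_push tree u i rest size hlen hnn hi hvr hz]
        · rw [if_neg hz]
          have hwf' : WFs tree ((u, i+1) :: rest) size := by
            refine ⟨hlen, hnn, htree, ?_⟩
            intro q hqmem
            rcases List.mem_cons.mp hqmem with rfl | h
            · exact hq
            · exact hstack q (List.mem_cons_of_mem _ h)
          have hmu' : muS tree D ((u, i+1) :: rest) size ≤ fuel := by
            simp only [muS, List.map_cons, List.sum_cons, List.length_cons] at hmu ⊢
            omega
          rw [ih _ _ hwf' hmu']
          rw [← ps_adv tree u i rest size hi hz]
      · rw [dif_neg hi]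
        match rest with
        | [] =>
          rw [runB_nil, ps_last tree u i size hi]
        | (p, j) :: rest' =>
          show runB tree fuel ((p, j) :: rest')
                (size.set (pidx size.length p)
                  (size.getD (pidx size.length p) 0 + size.getD (pidx size.length u) 0))
              = processStack tree ((u, i) :: (p, j) :: rest') size
          have hp : size.getD (pidx size.length p) 0 ≠ 0 :=
            hstack (p, j) (List.mem_cons_of_mem _ List.mem_cons_self)
          have hpr : pidx size.length p < size.length := by
            by_contra hc
            apply hp
            rw [List.getD_eq_getElem?_getD, List.getElem?_eq_none (by omega)]
            rfl
          have hpnn : 0 ≤ size.getD (pidx size.length p) 0 := hnn _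
          have hunn : 0 ≤ size.getD (pidx size.length u) 0 := hnn _
          set size' : List Int := size.set (pidx size.length p)
            (size.getD (pidx size.length p) 0 + size.getD (pidx size.length u) 0) with hsz
          have hlep : lep size size' := lep_set_ge (by omega)
          have hwf' : WFs tree ((p, j) :: rest') size' := by
            refine ⟨by rw [hsz, List.length_set]; exact hlen,
              znn_of_lep hnn hlep,
              by intro l hl w hw; rw [hsz, List.length_set]; exact htree l hl w hw, ?_⟩
            intro q hqmem
            have hqold := hstack q (List.mem_cons_of_mem _ hqmem)
            rw [hsz, List.length_set]
            by_cases he : pidx size.length q.1 = pidx size.length p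
            · rw [he, getD_set_self hpr]
              have : size.getD (pidx size.length p) 0 ≠ 0 := hp
              omega
            · rw [getD_set_ne he]; exact hqold
          have hmu' : muS tree D ((p, j) :: rest') size' ≤ fuel := by
            have hzle : zct size' ≤ zct size := zct_le_of_lep hlep hnn
            simp only [muS, List.map_cons, List.sum_cons, List.length_cons] at hmu ⊢
            have : zct size' * (D + 2) ≤ zct size * (D + 2) := Nat.mul_le_mul_right _ hzle
            omega
          rw [ih _ _ hwf' hmu']
          rw [← ps_pop tree u p i j rest' size hi]

-- build invariants for the adjacency lists
def wOK (n : Int) (w : List Int) : Prop :=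
  match w with
  | [u, v] => -(n+1) ≤ u ∧ u ≤ n ∧ -(n+1) ≤ v ∧ v ≤ n
  | _ => False

lemma getD_elems {n : Int} {tree : List (List Int)}
    (h : ∀ l ∈ tree, ∀ v ∈ l, -(n+1) ≤ v ∧ v ≤ n) (k : Nat) :
    ∀ v ∈ tree.getD k [], -(n+1) ≤ v ∧ v ≤ n := by
  intro v hv
  exact h _ (getD_tree_mem (by intro hnil; rw [hnil] at hv; simp at hv)) v hv

lemma build_inv (n : Int) :
    ∀ (ws : List (List Int)) (tree : List (List Int)) (c : Nat),
      (∀ w ∈ ws, wOK n w) →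
      tree.length = (n+1).toNat →
      (∀ l ∈ tree, ∀ v ∈ l, -(n+1) ≤ v ∧ v ≤ n) →
      (∀ l ∈ tree, l.length ≤ 2*c) →
      (ws.foldl addEdge tree).length = (n+1).toNat ∧
      (∀ l ∈ ws.foldl addEdge tree, ∀ v ∈ l, -(n+1) ≤ v ∧ v ≤ n) ∧
      (∀ l ∈ ws.foldl addEdge tree, l.length ≤ 2*(c + ws.length)) := by
  intro ws
  induction ws with
  | nil =>
    intro tree c _ hlen hrange hdeg
    exact ⟨hlen, hrange, fun l hl => le_trans (hdeg l hl) (by omega)⟩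
  | cons w ws ihws =>
    intro tree c hok hlen hrange hdeg
    have hw := hok w List.mem_cons_self
    match w, hw with
    | [a, b], hab =>
      obtain ⟨ha0, han, hb0, hbn⟩ := hab
      rw [List.foldl_cons]
      have hA : addEdge tree [a, b]
          = (tree.set (pidx tree.length a) ((tree.getD (pidx tree.length a) []) ++ [b])).set
              (pidx (tree.set (pidx tree.length a) ((tree.getD (pidx tree.length a) []) ++ [b])).length b)
              (((tree.set (pidx tree.length a) ((tree.getD (pidx tree.length a) []) ++ [b])).getD
                (pidx (tree.set (pidx tree.length a) ((tree.getD (pidx tree.length a) []) ++ [b])).length b) []) ++ [a]) := rfl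
      rw [hA]
      set t1 : List (List Int) := tree.set (pidx tree.length a) ((tree.getD (pidx tree.length a) []) ++ [b]) with ht1
      set t2 : List (List Int) := t1.set (pidx t1.length b) ((t1.getD (pidx t1.length b) []) ++ [a]) with ht2
      have ht1len : t1.length = (n+1).toNat := by rw [ht1, List.length_set]; exact hlen
      have ht2len : t2.length = (n+1).toNat := by rw [ht2, List.length_set]; exact ht1len
      have hrange1 : ∀ l ∈ t1, ∀ v ∈ l, -(n+1) ≤ v ∧ v ≤ n := by
        intro l hl v hv
        rcases List.mem_or_eq_of_mem_set hl with h | h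
        · exact hrange l h v hv
        · subst h
          rcases List.mem_append.mp hv with h | h
          · exact getD_elems hrange _ v h
          · simp at h; subst h; exact ⟨hb0, hbn⟩
      have hrange2 : ∀ l ∈ t2, ∀ v ∈ l, -(n+1) ≤ v ∧ v ≤ n := by
        intro l hl v hv
        rcases List.mem_or_eq_of_mem_set hl with h | h
        · exact hrange1 l h v hv
        · subst h
          rcases List.mem_append.mp hv with h | h
          · exact getD_elems hrange1 _ v h
          · simp at h; subst h; exact ⟨ha0, han⟩
      have hdeg1 : ∀ l ∈ t1, l.length ≤ 2*c + 1 := by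
        intro l hl
        rcases List.mem_or_eq_of_mem_set hl with h | h
        · exact le_trans (hdeg l h) (by omega)
        · subst h
          have := getD_tree_le hdeg (pidx tree.length a)
          simp only [List.length_append, List.length_cons, List.length_nil]
          omega
      have hdeg2 : ∀ l ∈ t2, l.length ≤ 2*(c+1) := by
        intro l hl
        rcases List.mem_or_eq_of_mem_set hl with h | h
        · exact le_trans (hdeg1 l h) (by omega)
        · subst h
          have := getD_tree_le hdeg1 (pidx t1.length b)
          simp only [List.length_append, List.length_cons, List.length_nil]
          omega
      have hres := ihws t2 (c+1) (fun w' hw' => hok w' (List.mem_cons_of_mem _ hw'))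
        ht2len hrange2 hdeg2
      refine ⟨hres.1, hres.2.1, ?_⟩
      intro l hl
      have := hres.2.2 l hl
      simp only [List.length_cons]
      omega

lemma zct_replicate (N : Nat) : zct (List.replicate N (0:Int)) = N := by
  induction N with
  | zero => rfl
  | succ N ih => rw [List.replicate_succ]; simp [zct, List.countP_cons] at ih ⊢; omega

lemma getD_replicate0 (N k : Nat) : (List.replicate N (0:Int)).getD k 0 = 0 := by
  by_cases hk : k < N
  · rw [List.getD_replicate _ hk]
  · rw [List.getD_eq_getElem?_getD, List.getElem?_eq_none (by simpa using le_of_not_gt hk)]; rfl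

lemma pre_wok {n : Int} {wires : List (List Int)}
    (h : (wires.all (fun w => w.length == 2 && w.all (fun x => decide (-(n+1) ≤ x) && decide (x ≤ n)))) = true) :
    ∀ w ∈ wires, wOK n w := by
  intro w hw
  have h2 := List.all_eq_true.mp h w hw
  simp only [Bool.and_eq_true, beq_iff_eq, List.all_eq_true, decide_eq_true_eq] at h2
  obtain ⟨hl, hx⟩ := h2
  rcases w with _ | ⟨a, _ | ⟨b, _ | ⟨c0, t⟩⟩⟩
  · simp at hl
  · simp at hl
  · exact ⟨(hx a (by simp)).1, (hx a (by simp)).2, (hx b (by simp)).1, (hx b (by simp)).2⟩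
  · simp at hl

lemma pidx_lt {N : Nat} {n v : Int} (hN : N = (n+1).toNat) (hn : 1 ≤ n) (h2 : v ≤ n) :
    pidx N v < N := by
  simp only [pidx]
  split_ifs <;> omega

lemma pidx_one {N : Nat} : pidx N (1:Int) = 1 := by simp [pidx]

-- ===== VERDICT (by name: the statement is the Claim_ definition above) =====
theorem solution_spec : Claim_equal_solution := by
  intro n wires _hdom hpre
  obtain ⟨hn, hall⟩ := hpre
  show solution n wires = solution_alt n wires
  have hwok := pre_wok hall
  have hinit_len : (List.replicate (n+1).toNat ([] : List Int)).length = (n+1).toNat := by simp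
  have hinit_range : ∀ l ∈ (List.replicate (n+1).toNat ([] : List Int)), ∀ v ∈ l, -(n+1) ≤ v ∧ v ≤ n := by
    intro l hl v hv; rw [List.eq_of_mem_replicate hl] at hv; simp at hv
  have hinit_deg : ∀ l ∈ (List.replicate (n+1).toNat ([] : List Int)), l.length ≤ 2*0 := by
    intro l hl; rw [List.eq_of_mem_replicate hl]; simp
  obtain ⟨hlen, hrange, hdeg⟩ :=
    build_inv n wires _ 0 hwok hinit_len hinit_range hinit_deg
  set N := (n+1).toNat with hNdef
  set tree := wires.foldl addEdge (List.replicate N []) with htreedef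
  set D := 2 * wires.length with hDdef
  have hN2 : 2 ≤ N := by omega
  have hdeg' : ∀ l ∈ tree, l.length ≤ D := by
    intro l hl; have := hdeg l hl; omega
  set size0 : List Int := (List.replicate N (0:Int)).set 1 1 with hsz0
  have hsz0len : size0.length = N := by rw [hsz0, List.length_set, List.length_replicate]
  have h1N : 1 < N := by omega
  have h1N' : 1 < (List.replicate N (0:Int)).length := by simpa using h1N
  have hget1 : size0.getD 1 0 = 1 := by rw [hsz0]; exact getD_set_self h1N'
  have hznn0 : znn size0 := by
    intro k
    by_cases hk : k = 1
    · rw [hk, hget1]; norm_num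
    · rw [hsz0, getD_set_ne hk, getD_replicate0]
  have hzct0 : zct size0 + 1 = N := by
    rw [hsz0, zct_set1 h1N' (getD_replicate0 N 1), zct_replicate]
  have hwf : WFs tree [((1:Int), (0:Nat))] size0 := by
    refine ⟨hlen.trans hsz0len.symm, hznn0, ?_, ?_⟩
    · intro l hl v hv
      have := hrange l hl v hv
      rw [hsz0len]
      exact pidx_lt hNdef hn this.2
    · intro q hq
      rcases List.mem_cons.mp hq with rfl | hq'
      · show size0.getD (pidx size0.length 1) 0 ≠ 0
        rw [pidx_one, hget1]; norm_num
      · simp at hq'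
  have hmu : muS tree D [((1:Int), (0:Nat))] size0 ≤ (N + 1) * (D + 2) := by
    have hd1 : (tree.getD (pidx tree.length (1:Int)) []).length ≤ D := getD_tree_le hdeg' _
    have hzle : zct size0 ≤ N := by omega
    have hmul : zct size0 * (D + 2) ≤ N * (D + 2) := Nat.mul_le_mul_right _ hzle
    have hexp : (N + 1) * (D + 2) = N * (D + 2) + (D + 2) := by ring
    simp only [muS, List.map_cons, List.map_nil, List.sum_cons, List.sum_nil, List.length_cons,
      List.length_nil]
    omega
  have hsim := sim tree D hdeg' ((N + 1) * (D + 2)) [((1:Int), (0:Nat))] size0 hwf hmu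
  have hunfoldA : solution n wires
      = minAbsA n ((countA tree ((List.replicate N (0:Int)).length + 1) (List.replicate N (0:Int)) 1).2) := rfl
  have hunfoldB : solution_alt n wires
      = minAbsA n (runB tree ((N + 1) * (D + 2)) [((1:Int), (0:Nat))] size0) := rfl
  rw [hunfoldA, hunfoldB, hsim]
  congr 1
  rw [List.length_replicate, countA_succ,
    if_neg (by rw [List.length_replicate, pidx_one, getD_replicate0]; exact fun h => h rfl)]
  show (tree.getD (pidx tree.length 1) []).foldl (stepA tree N (1:Int))
        ((List.replicate N (0:Int)).set (pidx (List.replicate N (0:Int)).length 1) 1)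
      = processStack tree [((1:Int), (0:Nat))] size0
  rw [processStack_cons]
  simp only [List.drop_zero]
  show (tree.getD (pidx tree.length 1) []).foldl (stepA tree N (1:Int))
        ((List.replicate N (0:Int)).set (pidx (List.replicate N (0:Int)).length 1) 1)
      = (tree.getD (pidx tree.length 1) []).foldl (stepA tree (size0.length + 1) (1:Int)) size0
  rw [hsz0len]
  have := foldl_stepA_fuel tree (N + 1) N (1:Int) (tree.getD (pidx tree.length 1) []) size0
    hznn0 (hlen.trans hsz0len.symm) (by omega) (by omega)
  rw [this]
  simp only [List.length_replicate, pidx_one]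
  rfl
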